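-- pv_equiv track=rewrite | github.com/JubEfrei/pychatbot-casamian-brosset | main.py | traitement_question
-- ===== SOURCE A (Python) =====
-- def is_letter(char):
--     if 96 < char < 123 or 231 <= char <= 234 or char == 224 or char == 249 or char == 244 or char == 226:
--         return True
--     return False
--
-- def traitement_question(phrase):
--     """Prend en paramètre une phrase, une question par exemple, et renvoi la liste des mots de la question"""
--     mots = phrase.lower().split()
--     res = []
--     for i in range(len(mots)):
--         mot = ""
--         for j in range(len(mots[i])):
--             if is_letter(ord(mots[i][j])):
--                 mot += mots[i][j]
--             else:
--                 if mot != "":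
--                     res.append(mot)
--                     mot = ""
--         if mot != "":
--             res.append(mot)
--     return res
-- ===== SOURCE B (Python) =====
-- LETTERS = "abcdefghijklmnopqrstuvwxyz\u00e0\u00e2\u00e7\u00e8\u00e9\u00ea\u00f4\u00f9"
--
-- def traitement_question(phrase):
--     """Single flat pass: collect maximal runs of letters, no whitespace pre-split."""
--     res = []
--     cur = ""
--     for ch in phrase.lower():
--         if ch in LETTERS:
--             cur += ch
--         else:
--             if cur:
--                 res.append(cur)
--                 cur = ""
--     if cur:
--         res.append(cur)
--     return res
-- ===== Notes on version B (the rewrite author's own statement) =====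
-- stated objective: simpler
-- what changed: Replaces split-into-words plus a nested per-word scan (with an ord-range letter test) by one flat pass over the lowered string that emits maximal runs of letters, using a letter-alphabet membership test; no intermediate word list is built.
import Mathlib
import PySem

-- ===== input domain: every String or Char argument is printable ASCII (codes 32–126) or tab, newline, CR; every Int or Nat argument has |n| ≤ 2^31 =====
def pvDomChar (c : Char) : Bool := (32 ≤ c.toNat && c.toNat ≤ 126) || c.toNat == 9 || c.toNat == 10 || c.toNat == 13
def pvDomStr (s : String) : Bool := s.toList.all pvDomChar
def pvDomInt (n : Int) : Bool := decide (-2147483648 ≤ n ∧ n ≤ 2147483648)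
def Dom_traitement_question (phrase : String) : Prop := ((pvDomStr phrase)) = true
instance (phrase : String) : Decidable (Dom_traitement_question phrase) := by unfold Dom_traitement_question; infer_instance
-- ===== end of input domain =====

-- B replaces A's whitespace-split + nested per-word scan by one flat pass emitting maximal letter runs (simpler, same O(n) cost).

-- ===== PORT A =====
def is_letter (char : Int) : Bool :=
  if (96 < char ∧ char < 123) ∨ (231 ≤ char ∧ char ≤ 234) ∨ char = 224 ∨ char = 249 ∨ char = 244 ∨ char = 226 then
    true
  else
    false

-- A: mots = phrase.lower().split(); for each word, scan its chars, flushing the current run at non-letters.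
-- (strings handled on the List Char side per PySem convention; words kept as List Char, results as String)
def traitement_question (phrase : String) : List String :=
  let mots := PySem.Chars.split₀ (PySem.Chars.lower phrase.toList)
  mots.foldl (fun (res : List String) (mot_i : List Char) =>
    let st : List String × List Char := mot_i.foldl (fun (st : List String × List Char) ch =>
      if is_letter (ch.toNat : Int) then (st.1, st.2 ++ [ch])
      else if st.2 ≠ [] then (st.1 ++ [String.ofList st.2], []) else st) (res, [])
    if st.2 ≠ [] then st.1 ++ [String.ofList st.2] else st.1) []

-- ===== PORT B =====
-- LETTERS = "abcdefghijklmnopqrstuvwxyzàâçèéêôù" (as its character list)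
def pvLetters : List Char :=
  ['a','b','c','d','e','f','g','h','i','j','k','l','m','n','o','p','q','r','s','t','u','v','w','x','y','z','à','â','ç','è','é','ê','ô','ù']

-- the loop body of B: extend the current run on a letter, otherwise flush it
def pvStep (st : List String × List Char) (ch : Char) : List String × List Char :=
  if pvLetters.contains ch then (st.1, st.2 ++ [ch])
  else if st.2 ≠ [] then (st.1 ++ [String.ofList st.2], []) else st

def traitement_question_alt (phrase : String) : List String :=
  let st := (PySem.Chars.lower phrase.toList).foldl pvStep ([], [])
  if st.2 ≠ [] then st.1 ++ [String.ofList st.2] else st.1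

-- ===== PRECONDITION & SPEC =====
def Spec_traitement_question (phrase : String) (out : List String) : Prop := out = traitement_question_alt phrase
instance (phrase : String) (out : List String) : Decidable (Spec_traitement_question phrase out) := by unfold Spec_traitement_question; infer_instance

-- ===== CLAIM (what is proved, stated in full; the proofs are below) =====
def Claim_equal_traitement_question : Prop := ∀ (phrase : String), Dom_traitement_question phrase → Spec_traitement_question phrase (traitement_question phrase)

-- ===== LEMMAS AND PROOFS =====

def pvFlush (st : List String × List Char) : List String :=
  if st.2 ≠ [] then st.1 ++ [String.ofList st.2] else st.1

theorem char_eq_iff_toNat (c d : Char) : (c = d) ↔ c.toNat = d.toNat := by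
  constructor
  · intro h; rw [h]
  · intro h; exact Char.ext (UInt32.toNat_inj.mp h)

set_option maxRecDepth 2048 in
theorem mem_pvLetters_iff (c : Char) : c ∈ pvLetters ↔
    (97 ≤ c.toNat ∧ c.toNat ≤ 122) ∨ (231 ≤ c.toNat ∧ c.toNat ≤ 234) ∨
    c.toNat = 224 ∨ c.toNat = 249 ∨ c.toNat = 244 ∨ c.toNat = 226 := by
  simp only [pvLetters, List.mem_cons, List.not_mem_nil, or_false, char_eq_iff_toNat,
    (by decide : 'a'.toNat = 97), (by decide : 'b'.toNat = 98), (by decide : 'c'.toNat = 99), (by decide : 'd'.toNat = 100), (by decide : 'e'.toNat = 101), (by decide : 'f'.toNat = 102), (by decide : 'g'.toNat = 103), (by decide : 'h'.toNat = 104), (by decide : 'i'.toNat = 105), (by decide : 'j'.toNat = 106), (by decide : 'k'.toNat = 107), (by decide : 'l'.toNat = 108), (by decide : 'm'.toNat = 109), (by decide : 'n'.toNat = 110), (by decide : 'o'.toNat = 111), (by decide : 'p'.toNat = 112), (by decide : 'q'.toNat = 113), (by decide : 'r'.toNat = 114), (by decide : 's'.toNat = 115), (by decide : 't'.toNat = 116),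 (by decide : 'u'.toNat = 117), (by decide : 'v'.toNat = 118), (by decide : 'w'.toNat = 119), (by decide : 'x'.toNat = 120), (by decide : 'y'.toNat = 121), (by decide : 'z'.toNat = 122), (by decide : 'à'.toNat = 224), (by decide : 'â'.toNat = 226), (by decide : 'ç'.toNat = 231), (by decide : 'è'.toNat = 232), (by decide : 'é'.toNat = 233), (by decide : 'ê'.toNat = 234), (by decide : 'ô'.toNat = 244), (by decide : 'ù'.toNat = 249)]
  omega

-- B's membership test agrees with A's is_letter(ord(·)) on every character
theorem letter_eq (c : Char) : pvLetters.contains c = is_letter (c.toNat : Int) := by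
  rw [Bool.eq_iff_iff]
  simp only [List.contains_eq_mem, decide_eq_true_eq, is_letter]
  rw [mem_pvLetters_iff]
  constructor
  · intro h; split
    · rfl
    · rename_i hc; exfalso; apply hc; omega
  · intro h; split at h
    · rename_i hc; omega
    · exact absurd h (by simp)

theorem space_not_letter (c : Char) (h : PySem.Chars.isspace c = true) :
    pvLetters.contains c = false := by
  simp [PySem.Chars.isspace] at h
  rw [Bool.eq_false_iff, Ne, List.contains_eq_mem, decide_eq_true_eq, mem_pvLetters_iff]
  omega

theorem pvStep_not_letter (st : List String × List Char) (c : Char)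
    (h : pvLetters.contains c = false) : pvStep st c = (pvFlush st, []) := by
  have hm : c ∉ pvLetters := by simpa [List.contains_eq_mem] using h
  obtain ⟨res, cur⟩ := st
  cases cur <;> simp [pvStep, pvFlush, hm]

theorem go_acc (cs cur : List Char) (acc : List (List Char)) :
    PySem.Chars.split₀.go cs cur acc = acc.reverse ++ PySem.Chars.split₀.go cs cur [] := by
  induction cs generalizing cur acc with
  | nil =>
    rw [PySem.Chars.split₀.go.eq_def, PySem.Chars.split₀.go.eq_def]
    by_cases h : cur.isEmpty <;> simp [h]
  | cons c rest ih =>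
    rw [PySem.Chars.split₀.go.eq_def]
    conv_rhs => rw [PySem.Chars.split₀.go.eq_def]
    by_cases hs : PySem.Chars.isspace c
    · by_cases h : cur.isEmpty
      · simp only [hs, h, if_true, ih _ acc]
      · simp only [hs, h, if_true, Bool.false_eq_true, if_false, ih _ (cur.reverse :: acc),
          ih _ [cur.reverse]]
        simp
    · have hs' : PySem.Chars.isspace c = false := by simpa using hs
      simp only [hs', Bool.false_eq_true, if_false, ih _ acc]

-- the central invariant: A's word-by-word processing of split₀.go equals B's continued flat scan
theorem pv_main (cs cur : List Char) (res : List String) :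
    List.foldl (fun r w => pvFlush (List.foldl pvStep (r, []) w)) res (PySem.Chars.split₀.go cs cur []) =
      pvFlush (List.foldl pvStep (List.foldl pvStep (res, []) cur.reverse) cs) := by
  induction cs generalizing cur res with
  | nil =>
    rw [PySem.Chars.split₀.go.eq_def]
    by_cases h : cur.isEmpty
    · have hcur : cur = [] := by simpa using h
      simp [hcur, pvFlush]
    · simp [h, pvFlush]
  | cons c rest ih =>
    rw [PySem.Chars.split₀.go.eq_def]
    by_cases hs : PySem.Chars.isspace c
    · have hc := space_not_letter c hs
      by_cases h : cur.isEmpty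
      · have hcur : cur = [] := by simpa using h
        simp only [hs, hcur, if_true, List.reverse_nil, List.foldl_nil, List.foldl_cons,
          pvStep_not_letter _ _ hc]
        simpa [pvFlush] using ih [] res
      · simp only [hs, h, if_true, Bool.false_eq_true, if_false, go_acc rest [] [cur.reverse]]
        simp only [List.reverse_cons, List.reverse_nil, List.nil_append, List.singleton_append,
          List.foldl_cons]
        rw [ih]
        simp only [List.reverse_nil, List.foldl_nil, pvStep_not_letter _ _ hc]
    · have hs' : PySem.Chars.isspace c = false := by simpa using hs
      simp only [hs', Bool.false_eq_true, if_false, ih, List.reverse_cons, List.foldl_append,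
        List.foldl_cons, List.foldl_nil]

-- ===== VERDICT (by name: the statement is the Claim_ definition above) =====
theorem traitement_question_spec : Claim_equal_traitement_question := by
  intro phrase _
  unfold Spec_traitement_question traitement_question traitement_question_alt
  have hstep : (fun (st : List String × List Char) ch =>
      if is_letter (ch.toNat : Int) then (st.1, st.2 ++ [ch])
      else if st.2 ≠ [] then (st.1 ++ [String.ofList st.2], []) else st) = pvStep := by
    funext st ch
    simp only [pvStep, letter_eq]
  simp only [hstep, PySem.Chars.split₀]
  have := pv_main (PySem.Chars.lower phrase.toList) [] []
  simpa [pvFlush] using this
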